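-- pv_equiv track=rewrite | github.com/withpi/NLWeb | code/python/core/prompts.py | extract_variables_from_prompt
-- ===== SOURCE A (Python) =====
-- def extract_variables_from_prompt(prompt):
--     # Find all strings between { and }
--     variables = set()
--     start = 0
--     while True:
--         # Find next opening brace
--         start = prompt.find('{', start)
--         if start == -1:
--             break
--
--         # Find matching closing brace
--         end = prompt.find('}', start)
--         if end == -1:
--             break
--
--         # Extract variable name and add to set
--         var = prompt[start+1:end].strip()
--         variables.add(var)
--
--         # Move start position
--         start = end + 1
--     return variables
-- ===== SOURCE B (Python) =====
-- def extract_variables_from_prompt(prompt):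
--     # One-pass state machine over the characters: outside braces buf is None;
--     # a '{' opens a buffer, the next '}' emits the stripped buffer into the set.
--     variables = set()
--     buf = None
--     for ch in prompt:
--         if buf is None:
--             if ch == '{':
--                 buf = []
--         elif ch == '}':
--             variables.add(''.join(buf).strip())
--             buf = None
--         else:
--             buf.append(ch)
--     return variables
-- ===== Notes on version B (the rewrite author's own statement) =====
-- stated objective: alternative
-- what changed: B replaces A's repeated str.find index-jumping loop with a single left-to-right character pass driven by a two-state machine (outside braces / accumulating a buffer), emitting the stripped buffer at each closing brace.
import Mathlib
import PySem

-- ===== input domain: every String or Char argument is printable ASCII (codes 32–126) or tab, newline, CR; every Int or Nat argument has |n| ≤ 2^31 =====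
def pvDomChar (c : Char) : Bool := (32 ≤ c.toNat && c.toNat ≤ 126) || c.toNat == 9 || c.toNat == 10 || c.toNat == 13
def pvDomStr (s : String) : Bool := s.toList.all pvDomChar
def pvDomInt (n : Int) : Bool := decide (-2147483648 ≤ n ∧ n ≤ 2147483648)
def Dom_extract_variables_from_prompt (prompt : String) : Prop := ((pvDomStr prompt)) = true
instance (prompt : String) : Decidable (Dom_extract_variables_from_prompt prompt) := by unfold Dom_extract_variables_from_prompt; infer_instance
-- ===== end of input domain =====

-- B replaces A's repeated str.find loop by a single-pass two-state character machine; objective: alternative (same O(n) cost).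
-- ===== PORT A =====
-- A's while loop: the fuel counter only makes the recursion structural
-- (s.length + 1 - start strictly decreases, so fuel never runs out); each step is A's body verbatim.
def pvLoopA (s : String) (fuel : Nat) (start : Nat) (vars : PySem.Set String) : PySem.Set String :=
  match fuel with
  | 0 => vars
  | fuel + 1 =>
    let i := PySem.Str.findFrom s "{" (start : Int) none
    if i = -1 then vars
    else
      let j := PySem.Str.findFrom s "}" i none
      if j = -1 then vars
      else
        pvLoopA s fuel (j.toNat + 1)
          (PySem.Set.add vars (PySem.Str.strip (PySem.Str.slice s (some (i + 1)) (some j))))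

def extract_variables_from_prompt (prompt : String) : List String :=
  pvLoopA prompt (prompt.toList.length + 1) 0 PySem.Set.empty

-- ===== PORT B =====
-- B's state machine: state none = outside braces, some buf = accumulating since the last '{'.
def pvStateB (cs : List Char) (st : Option (List Char)) (vars : PySem.Set String) : PySem.Set String :=
  match cs, st with
  | [], _ => vars
  | c :: cs, none => if c = '{' then pvStateB cs (some []) vars else pvStateB cs none vars
  | c :: cs, some buf =>
    if c = '}' then pvStateB cs none (PySem.Set.add vars (PySem.Str.strip (String.ofList buf)))
    else pvStateB cs (some (buf ++ [c])) vars

def extract_variables_from_prompt_alt (prompt : String) : List String :=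
  pvStateB prompt.toList none PySem.Set.empty

-- ===== PRECONDITION & SPEC =====
def Spec_extract_variables_from_prompt (prompt : String) (out : List String) : Prop := out = extract_variables_from_prompt_alt prompt
instance (prompt : String) (out : List String) : Decidable (Spec_extract_variables_from_prompt prompt out) := by unfold Spec_extract_variables_from_prompt; infer_instance

-- ===== CLAIM (what is proved, stated in full; the proofs are below) =====
def Claim_equal_extract_variables_from_prompt : Prop := ∀ (prompt : String), Dom_extract_variables_from_prompt prompt → Spec_extract_variables_from_prompt prompt (extract_variables_from_prompt prompt)

-- ===== LEMMAS AND PROOFS =====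

-- `[c]` occurs as an infix iff `c` is an element
theorem pv_singleton_infix {c : Char} {t : List Char} : [c] <:+: t ↔ c ∈ t := by
  constructor
  · intro h; exact List.singleton_sublist.mp h.sublist
  · intro h
    obtain ⟨pre, post, rfl⟩ := List.append_of_mem h
    exact ⟨pre, post, by simp⟩

-- a singleton prefix determines the head
theorem pv_singleton_prefix {c : Char} {t : List Char} (h : [c] <+: t) :
    ∃ u, t = c :: u := by
  obtain ⟨u, rfl⟩ := h; exact ⟨u, rfl⟩

-- the state machine ignores everything outside braces
theorem pvStateB_no_open {cs : List Char} (h : '{' ∉ cs) (vars : PySem.Set String) :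
    pvStateB cs none vars = vars := by
  induction cs with
  | nil => rfl
  | cons c cs ih =>
    simp only [List.mem_cons, not_or] at h
    simp [pvStateB, Ne.symm h.1, ih h.2]

-- an unterminated buffer is discarded
theorem pvStateB_no_close {cs : List Char} (h : '}' ∉ cs) :
    ∀ buf vars, pvStateB cs (some buf) vars = vars := by
  induction cs with
  | nil => intro buf vars; rfl
  | cons c cs ih =>
    intro buf vars
    simp only [List.mem_cons, not_or] at h
    simp [pvStateB, Ne.symm h.1, ih h.2]

-- a prefix without '{' is skipped in the outside state
theorem pvStateB_skip {pre : List Char} (h : '{' ∉ pre) (rest : List Char)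
    (vars : PySem.Set String) : pvStateB (pre ++ rest) none vars = pvStateB rest none vars := by
  induction pre with
  | nil => rfl
  | cons c cs ih =>
    simp only [List.mem_cons, not_or] at h
    simp [pvStateB, Ne.symm h.1, ih h.2]

-- inside braces, characters up to the next '}' are accumulated, then emitted
theorem pvStateB_accum {mid : List Char} (h : '}' ∉ mid) :
    ∀ buf rest vars, pvStateB (mid ++ '}' :: rest) (some buf) vars =
      pvStateB rest none (PySem.Set.add vars (PySem.Str.strip (String.ofList (buf ++ mid)))) := by
  induction mid with
  | nil => intro buf rest vars; simp [pvStateB]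
  | cons c cs ih =>
    intro buf rest vars
    simp only [List.mem_cons, not_or] at h
    simpa [pvStateB, Ne.symm h.1] using ih h.2 (buf ++ [c]) rest vars

-- main invariant: A's loop from position `start` equals B's machine on the suffix
theorem pv_main (s : String) (fuel start : Nat) (vars : PySem.Set String)
    (hstart : start ≤ s.toList.length) (hfuel : s.toList.length + 1 - start ≤ fuel) :
    pvLoopA s fuel start vars = pvStateB (s.toList.drop start) none vars := by
  induction fuel generalizing start vars with
  | zero => omega
  | succ fuel ih =>
    rw [pvLoopA]
    simp only [PySem.Str.findFrom_eq]
    rw [PySem.Chars.findFrom_natCast _ _ _ hstart]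
    set l := s.toList with hl
    set t := l.drop start with ht
    by_cases h1 : PySem.Chars.find t "{".toList = -1
    · simp only [if_pos h1]
      rw [if_pos trivial]
      have hno : '{' ∉ t := by
        rw [← pv_singleton_infix]
        exact fun hc => absurd ((PySem.Chars.find_ne_neg_one_iff t "{".toList).mpr (by simpa using hc)) (by simpa using h1)
      rw [pvStateB_no_open hno]
    · simp only [if_neg h1]
      have hf0 : 0 ≤ PySem.Chars.find t "{".toList := by
        rw [PySem.Chars.find_nonneg_iff, ← PySem.Chars.find_ne_neg_one_iff]; exact h1
      set p : Nat := (PySem.Chars.find t "{".toList).toNat with hp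
      have hfp : PySem.Chars.find t "{".toList = (p : Int) := by omega
      obtain ⟨hpre, hmin⟩ := PySem.Chars.find_spec (s := t) (sub := "{".toList) hf0
      rw [← hp] at hpre hmin
      obtain ⟨u1, hu1⟩ := pv_singleton_prefix (c := '{') (by simpa using hpre)
      have hpL : p < t.length := by
        by_contra hc
        rw [List.drop_eq_nil_of_le (by omega)] at hu1; simp at hu1
      set k : Nat := start + p with hk
      have hik : (start : Int) + PySem.Chars.find t "{".toList = ((k : Nat) : Int) := by
        omega
      have hdk : l.drop k = t.drop p := by rw [ht, List.drop_drop]; try ring_nf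
      have htL : t.length = l.length - start := by rw [ht]; simp
      have hkL : k ≤ l.length := by omega
      rw [if_neg (by omega), hik]
      rw [PySem.Chars.findFrom_natCast _ _ _ hkL, hdk, hu1]
      have htsplit : t = t.take p ++ ('{' :: u1) := by rw [← hu1, List.take_append_drop]
      have hnotake : '{' ∉ t.take p := by
        intro hm
        obtain ⟨q, hq, hqe⟩ := List.getElem_of_mem hm
        rw [List.getElem_take] at hqe
        have hqp : q < p := by have h2q := hq; rw [List.length_take] at h2q; omega
        refine hmin q hqp ?_
        rw [List.drop_eq_getElem_cons (by simp at hq; omega), hqe]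
        exact ⟨_, rfl⟩
      by_cases h2 : PySem.Chars.find ('{' :: u1) "}".toList = -1
      · simp only [if_pos h2]
        rw [if_pos trivial]
        have hnou : '}' ∉ ('{' :: u1) := by
          rw [← pv_singleton_infix]
          exact fun hc => absurd ((PySem.Chars.find_ne_neg_one_iff _ "}".toList).mpr (by simpa using hc)) (by simpa using h2)
        rw [htsplit, pvStateB_skip hnotake]
        rw [pvStateB, if_pos rfl]
        exact (pvStateB_no_close (cs := u1) (fun hm => hnou (List.mem_cons_of_mem _ hm)) [] vars).symm
      · simp only [if_neg h2]
        have hg0 : 0 ≤ PySem.Chars.find ('{' :: u1) "}".toList := by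
          rw [PySem.Chars.find_nonneg_iff, ← PySem.Chars.find_ne_neg_one_iff]; exact h2
        set q : Nat := (PySem.Chars.find ('{' :: u1) "}".toList).toNat with hq
        have hgq : PySem.Chars.find ('{' :: u1) "}".toList = (q : Int) := by omega
        have hgq' : PySem.Chars.find ('{' :: u1) (['}'] : List Char) = (q : Int) := hgq
        obtain ⟨hpre2, hmin2⟩ := PySem.Chars.find_spec (s := ('{' :: u1)) (sub := "}".toList) hg0
        rw [← hq] at hpre2 hmin2
        obtain ⟨u2, hu2⟩ := pv_singleton_prefix (c := '}') (by simpa using hpre2)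
        have hq0 : 1 ≤ q := by
          rcases Nat.eq_zero_or_pos q with h0 | h0
          · rw [h0] at hu2; simp at hu2
          · exact h0
        have hqL : q < ('{' :: u1).length := by
          by_contra hc
          rw [List.drop_eq_nil_of_le (by omega)] at hu2; simp at hu2
        rw [if_neg (by omega)]
        -- decompose u1 = mid ++ '}' :: u2 with '}' ∉ mid
        have hu1d : u1.drop (q - 1) = '}' :: u2 := by
          have : ('{' :: u1).drop q = u1.drop (q - 1) := by
            conv_lhs => rw [show q = (q - 1) + 1 by omega]
            rw [List.drop_succ_cons]
          rw [← this, hu2]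
        set mid : List Char := u1.take (q - 1) with hmid
        have hu1split : u1 = mid ++ '}' :: u2 := by rw [hmid, ← hu1d, List.take_append_drop]
        have hmidlen : mid.length = q - 1 := by
          have hqL' : q < u1.length + 1 := hqL
          rw [hmid, List.length_take]; omega
        have hnomid : '}' ∉ mid := by
          intro hm
          obtain ⟨r, hr, hre⟩ := List.getElem_of_mem hm
          simp only [hmid] at hr hre
          simp only [List.getElem_take] at hre
          refine hmin2 (r + 1) (by rw [hmidlen] at hr; omega) ?_
          rw [hmidlen] at hr
          rw [List.drop_eq_getElem_cons (by simp only [List.length_cons] at hqL ⊢; omega)]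
          rw [List.getElem_cons_succ]
          rw [hre]
          exact ⟨_, rfl⟩
        -- identify A's slice with mid
        have hslice : PySem.Str.slice s (some ((k : Int) + 1)) (some ((k : Int) + PySem.Chars.find ('{' :: u1) "}".toList)) = String.ofList mid := by
          apply String.toList_inj.mp
          rw [PySem.Str.toList_slice, String.toList_ofList]
          rw [hgq']
          have h1' : ((k : Int) + 1) = (((k + 1 : Nat)) : Int) := by push_cast; ring
          have h2' : ((k : Int) + (q : Int)) = (((k + q : Nat)) : Int) := by push_cast; ring
          rw [h1', h2']
          have hdk1 : l.drop (k + 1) = u1 := by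
            have : l.drop (k + 1) = (l.drop k).drop 1 := by rw [List.drop_drop]; try ring_nf
            rw [this, hdk, hu1]; rfl
          have hkqL : k + q ≤ l.length := by
            have : u1.length = l.length - (k + 1) := by rw [← hdk1]; simp
            simp at hqL; omega
          rw [PySem.Chars.slice_eq_listSlice, PySem.List.slice_natCast]
          rw [hl] at hdk1
          rw [hdk1]
          rw [show k + q - (k + 1) = q - 1 by omega]
          rw [hu1split]
          rw [List.take_append_of_le_length (by omega), ← hmidlen, List.take_length]
          exact String.toList_ofList.symm
        rw [hslice]
        -- A recurses; B walks through skip / open / accumulate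
        have hjt : ((k : Int) + PySem.Chars.find ('{' :: u1) "}".toList).toNat = k + q := by omega
        rw [hjt]
        have hqkL : k + q < l.length := by
          have hdk1 : l.drop (k + 1) = u1 := by
            have : l.drop (k + 1) = (l.drop k).drop 1 := by rw [List.drop_drop]; try ring_nf
            rw [this, hdk, hu1]; rfl
          have : u1.length = l.length - (k + 1) := by rw [← hdk1]; simp
          simp at hqL; omega
        rw [ih (k + q + 1) _ (by omega) (by omega)]
        have hdrop : l.drop (k + q + 1) = u2 := by
          have e1 : l.drop (k + q + 1) = (l.drop (k + 1)).drop q := by rw [List.drop_drop]; try ring_nf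
          have hdk1 : l.drop (k + 1) = u1 := by
            have : l.drop (k + 1) = (l.drop k).drop 1 := by rw [List.drop_drop]; try ring_nf
            rw [this, hdk, hu1]; rfl
          have e2 : u1.drop q = u2 := by
            have : u1.drop q = (u1.drop (q - 1)).drop 1 := by rw [List.drop_drop]; congr 1; omega
            rw [this, hu1d]; rfl
          rw [e1, hdk1, e2]
        rw [hdrop]
        rw [htsplit, pvStateB_skip hnotake, hu1split]
        rw [pvStateB, if_pos rfl]
        rw [pvStateB_accum hnomid]
        simp

-- ===== VERDICT (by name: the statement is the Claim_ definition above) =====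
theorem extract_variables_from_prompt_spec : Claim_equal_extract_variables_from_prompt := by
  intro prompt _
  unfold Spec_extract_variables_from_prompt
  unfold extract_variables_from_prompt extract_variables_from_prompt_alt
  rw [pv_main prompt _ 0 _ (by omega) (by omega)]
  rfl
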